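-- pv_equiv track=rewrite | github.com/gsime1/recurse_centre_application | game_of_fifteen/supporting_funcs.py | create_2d_array
-- ===== SOURCE A (Python) =====
-- def create_2d_array(dim, beg, step):
-- 	"""
-- 	generalised func to create a 2D array given a certain dimension.
-- 	:param dim: int, dimension of the 2D array.
-- 	:param beg: int, first element of the array.
-- 	:param step: int, increase of every consecutive element populating the array up to dim.
-- 	:return: list of lists, 2D array.
-- 	"""
-- 	from itertools import count
--
-- 	if all(map(lambda x: isinstance(x, int), [dim, beg, step])):  # checks all arguments are integers
-- 		counter = count(beg, step)
-- 		return [list(next(counter) for _ in range(dim))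
-- 		        for _ in range(dim)]
-- 	else:
-- 		raise TypeError("All arguments provided must be of type int.")
-- ===== SOURCE B (Python) =====
-- def create_2d_array(dim, beg, step):
--     """Same behaviour as A: dim x dim arithmetic grid, TypeError on non-int args."""
--     if not all(isinstance(x, int) for x in (dim, beg, step)):
--         raise TypeError("All arguments provided must be of type int.")
--     return [[beg + (i * dim + j) * step for j in range(dim)] for i in range(dim)]
-- ===== Notes on version B (the rewrite author's own statement) =====
-- stated objective: idiomatic
-- what changed: Replaces the shared stateful itertools.count iterator with a stateless closed-form value beg + (i*dim + j)*step computed from each cell's (row, column) index.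
import Mathlib
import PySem

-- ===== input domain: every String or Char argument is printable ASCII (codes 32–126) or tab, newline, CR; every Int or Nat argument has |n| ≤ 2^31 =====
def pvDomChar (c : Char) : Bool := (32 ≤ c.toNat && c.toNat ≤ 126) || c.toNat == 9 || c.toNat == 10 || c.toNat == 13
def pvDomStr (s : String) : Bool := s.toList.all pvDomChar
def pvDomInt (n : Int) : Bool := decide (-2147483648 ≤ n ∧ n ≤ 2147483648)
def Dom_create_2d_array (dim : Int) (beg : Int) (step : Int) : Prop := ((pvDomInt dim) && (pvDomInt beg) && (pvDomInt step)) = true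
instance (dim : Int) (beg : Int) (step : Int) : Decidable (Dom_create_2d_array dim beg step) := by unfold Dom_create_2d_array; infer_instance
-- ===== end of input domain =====

-- ===== PORT A =====
-- A advances a shared itertools.count counter; ported as a fold carrying (rows, counter).
-- The Lean signature fixes all arguments to Int, so A's isinstance check always passes
-- (Python bools count as ints there too); the TypeError branch is unreachable on this domain.
def pvRowA (dim : Int) (step : Int) (c : Int) : List Int × Int :=
  (PySem.List.pyRange 0 dim 1).foldl (fun p _ => (p.1 ++ [p.2], p.2 + step)) ([], c)

def create_2d_array (dim : Int) (beg : Int) (step : Int) : List (List Int) :=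
  ((PySem.List.pyRange 0 dim 1).foldl
    (fun (a : List (List Int) × Int) _ =>
      let r := pvRowA dim step a.2
      (a.1 ++ [r.1], r.2)) ([], beg)).1

-- ===== PORT B =====
-- B: stateless closed form, each cell from its (row, column) index.
def create_2d_array_alt (dim : Int) (beg : Int) (step : Int) : List (List Int) :=
  (PySem.List.pyRange 0 dim 1).map (fun i =>
    (PySem.List.pyRange 0 dim 1).map (fun j => beg + (i * dim + j) * step))

-- ===== PRECONDITION & SPEC =====
def Spec_create_2d_array (dim : Int) (beg : Int) (step : Int) (out : List (List Int)) : Prop := out = create_2d_array_alt dim beg step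
instance (dim : Int) (beg : Int) (step : Int) (out : List (List Int)) : Decidable (Spec_create_2d_array dim beg step out) := by unfold Spec_create_2d_array; infer_instance

-- ===== CLAIM (what is proved, stated in full; the proofs are below) =====
def Claim_equal_create_2d_array : Prop := ∀ (dim : Int) (beg : Int) (step : Int), Dom_create_2d_array dim beg step → Spec_create_2d_array dim beg step (create_2d_array dim beg step)

-- ===== LEMMAS AND PROOFS =====

-- ===== VERDICT (by name: the statement is the Claim_ definition above) =====
lemma pvRowA_foldl (step : Int) :
    ∀ (L : List Int) (acc : List Int) (c : Int),
      L.foldl (fun (p : List Int × Int) _ => (p.1 ++ [p.2], p.2 + step)) (acc, c)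
        = (acc ++ (List.range L.length).map (fun (k : Nat) => c + (k : Int) * step),
           c + L.length * step) := by
  intro L
  induction L with
  | nil => intro acc c; simp
  | cons x L ih =>
    intro acc c
    simp only [List.foldl_cons, List.length_cons]
    rw [ih (acc ++ [c]) (c + step)]
    simp only [Prod.mk.injEq]
    constructor
    · rw [List.range_succ_eq_map, List.map_cons, List.map_map]
      simp only [Nat.cast_zero, zero_mul, add_zero, List.append_assoc,
        List.singleton_append]
      congr 2
      apply List.map_congr_left
      intro k _
      simp only [Function.comp_apply]
      push_cast
      ring
    · push_cast; ring

lemma pvRowA_spec (dim step c : Int) :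
    pvRowA dim step c
      = ((List.range dim.toNat).map (fun (k : Nat) => c + (k : Int) * step),
         c + dim.toNat * step) := by
  unfold pvRowA
  rw [PySem.List.pyRange_one]
  rw [pvRowA_foldl]
  simp

lemma pvOuter_foldl (dim step : Int) :
    ∀ (L : List Int) (acc : List (List Int)) (c : Int),
      L.foldl (fun (a : List (List Int) × Int) _ =>
          (a.1 ++ [(List.range dim.toNat).map (fun (k : Nat) => a.2 + (k : Int) * step)],
           a.2 + dim.toNat * step)) (acc, c)
        = (acc ++ (List.range L.length).map (fun (i : Nat) =>
            (List.range dim.toNat).map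
              (fun (k : Nat) => c + ((i : Int) * dim.toNat + (k : Int)) * step)),
           c + L.length * (dim.toNat * step)) := by
  intro L
  induction L with
  | nil => intro acc c; simp
  | cons x L ih =>
    intro acc c
    simp only [List.foldl_cons]
    rw [ih]
    simp only [Prod.mk.injEq, List.length_cons]
    constructor
    · rw [List.range_succ_eq_map, List.map_cons, List.map_map]
      simp only [Nat.cast_zero, zero_mul, zero_add, List.append_assoc,
        List.singleton_append]
      congr 2
      apply List.map_congr_left
      intro i _
      simp only [Function.comp_apply]
      apply List.map_congr_left
      intro k _
      push_cast
      ring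
    · push_cast; ring

theorem create_2d_array_spec : Claim_equal_create_2d_array := by
  intro dim beg step _
  unfold Spec_create_2d_array create_2d_array create_2d_array_alt
  simp only [pvRowA_spec]
  rw [PySem.List.pyRange_one]
  rw [pvOuter_foldl]
  simp only [List.length_map, List.length_range, List.nil_append, sub_zero,
    List.map_map]
  by_cases h : 0 ≤ dim
  · have hd : ((dim.toNat : Int)) = dim := Int.toNat_of_nonneg h
    apply List.map_congr_left
    intro i _
    apply List.map_congr_left
    intro k _
    simp only [Function.comp_apply, hd]
    ring
  · have h0 : dim.toNat = 0 := by omega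
    simp [h0]
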